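-- pv_equiv track=rewrite | github.com/akshatg20/sql-parser | index.py | create_year_bounds
-- ===== SOURCE A (Python) =====
-- def create_year_bounds(years):
--     """
--     Given a list of years, create two dictionaries:
--     1. One that stores the smallest year >= the given year for each year between 1900 and 2100.
--     2. One that stores the largest year <= the given year for each year between 1900 and 2100.
--
--     :param years: List of years
--     :return: greater_equal_dict, less_equal_dict
--     """
--     # Sort the list of years
--     sorted_years = sorted(years)
--
--     # Define the range from 1900 to 2100
--     full_range = list(range(1900, 2101))
--
--     greater_equal_dict = {}
--     less_equal_dict = {}
--
--     for year in full_range: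
--         # Find the smallest year >= the given year
--         greater_equal_dict[year] = next((y for y in sorted_years if y >= year), None)
--
--         # Find the largest year <= the given year
--         less_equal_dict[year] = next((y for y in reversed(sorted_years) if y <= year), None)
--
--     return greater_equal_dict, less_equal_dict
-- ===== SOURCE B (Python) =====
-- def create_year_bounds(years):
--     """Two-pointer sweep: sort once, then walk the 1900..2100 range with a
--     single index into the sorted list instead of scanning it for every year."""
--     s = sorted(years)
--     n = len(s)
--     greater_equal_dict = {}
--     less_equal_dict = {}
--     i = 0
--     for year in range(1900, 2101):
--         while i < n and s[i] < year:
--             i += 1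
--         greater_equal_dict[year] = s[i] if i < n else None
--         if i < n and s[i] == year:
--             less_equal_dict[year] = year
--         elif i > 0:
--             less_equal_dict[year] = s[i - 1]
--         else:
--             less_equal_dict[year] = None
--     return greater_equal_dict, less_equal_dict
-- ===== Notes on version B (the rewrite author's own statement) =====
-- stated objective: faster
-- what changed: Replaced the per-year linear scans of the sorted list (a forward scan for the >= bound and a reverse scan for the <= bound, for each of the 201 years) by a single two-pointer sweep: one index advances monotonically through the sorted list while the year range is walked once.
import Mathlib
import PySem

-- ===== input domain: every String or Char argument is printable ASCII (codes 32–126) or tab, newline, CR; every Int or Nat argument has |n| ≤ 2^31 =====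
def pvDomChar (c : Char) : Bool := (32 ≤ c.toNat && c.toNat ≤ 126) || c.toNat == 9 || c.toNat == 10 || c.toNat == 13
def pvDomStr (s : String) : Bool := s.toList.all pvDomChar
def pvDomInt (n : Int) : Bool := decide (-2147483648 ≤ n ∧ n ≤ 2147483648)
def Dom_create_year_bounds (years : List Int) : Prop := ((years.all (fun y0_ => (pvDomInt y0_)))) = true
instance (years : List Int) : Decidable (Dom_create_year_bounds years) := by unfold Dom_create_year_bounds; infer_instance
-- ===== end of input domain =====

-- B replaces A's per-year linear scans of the sorted list by a single monotone two-pointer sweep.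

-- ===== PORT A =====
def create_year_bounds (years : List Int) : (List (Int × Option Int)) × (List (Int × Option Int)) :=
  let sorted_years := PySem.List.sorted years (fun y => y) false
  let full_range := PySem.List.pyRange 1900 2101 1
  let r := full_range.foldl
    (fun (p : PySem.Dict Int (Option Int) × PySem.Dict Int (Option Int)) year =>
      (p.1.insert year (sorted_years.find? (fun y => decide (y ≥ year))),
       p.2.insert year (sorted_years.reverse.find? (fun y => decide (y ≤ year)))))
    (PySem.Dict.empty, PySem.Dict.empty)
  (r.1.items, r.2.items)

-- ===== PORT B =====
-- the 'while i < n and s[i] < year: i += 1' inner loop of B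
def cybAdvance (s : List Int) (year : Int) (i : Nat) : Nat :=
  if h : i < s.length then
    if s[i] < year then cybAdvance s year (i + 1) else i
  else i
termination_by s.length - i
decreasing_by omega

-- the body of B's 'for year in range(1900, 2101)' loop
def cybStep (s : List Int)
    (st : Nat × PySem.Dict Int (Option Int) × PySem.Dict Int (Option Int)) (year : Int) :
    Nat × PySem.Dict Int (Option Int) × PySem.Dict Int (Option Int) :=
  let i := cybAdvance s year st.1
  let gev : Option Int := if i < s.length then s[i]? else none
  let lev : Option Int :=
    if i < s.length ∧ s[i]? = some year then some year
    else if 0 < i then s[i - 1]? else none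
  (i, st.2.1.insert year gev, st.2.2.insert year lev)

def create_year_bounds_alt (years : List Int) : (List (Int × Option Int)) × (List (Int × Option Int)) :=
  let s := PySem.List.sorted years (fun y => y) false
  let r := (PySem.List.pyRange 1900 2101 1).foldl (cybStep s)
    (0, PySem.Dict.empty, PySem.Dict.empty)
  (r.2.1.items, r.2.2.items)

-- ===== PRECONDITION & SPEC =====
def Spec_create_year_bounds (years : List Int) (out : (List (Int × Option Int)) × (List (Int × Option Int))) : Prop := out = create_year_bounds_alt years
instance (years : List Int) (out : (List (Int × Option Int)) × (List (Int × Option Int))) : Decidable (Spec_create_year_bounds years out) := by unfold Spec_create_year_bounds; infer_instance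

-- ===== CLAIM (what is proved, stated in full; the proofs are below) =====
def Claim_equal_create_year_bounds : Prop := ∀ (years : List Int), Dom_create_year_bounds years → Spec_create_year_bounds years (create_year_bounds years)

-- ===== LEMMAS AND PROOFS =====

-- the value B stores for the >= bound, expressed through bisectLeft
def cybGe (s : List Int) (t : Int) : Option Int :=
  if PySem.List.bisectLeft s t < s.length then s[PySem.List.bisectLeft s t]? else none

-- the value B stores for the <= bound, expressed through bisectLeft
def cybLe (s : List Int) (t : Int) : Option Int :=
  if PySem.List.bisectLeft s t < s.length ∧ s[PySem.List.bisectLeft s t]? = some t then some t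
  else if 0 < PySem.List.bisectLeft s t then s[PySem.List.bisectLeft s t - 1]? else none

theorem cybAdvance_eq (s : List Int) (hs : s.Pairwise (· ≤ ·)) (t : Int) (i : Nat)
    (h : i ≤ PySem.List.bisectLeft s t) : cybAdvance s t i = PySem.List.bisectLeft s t := by
  obtain ⟨hb1, hb2, hb3⟩ := PySem.List.bisectLeft_spec s t hs
  rcases Nat.lt_or_ge i (PySem.List.bisectLeft s t) with hlt | hge
  · have hi : i < s.length := Nat.lt_of_lt_of_le hlt hb1
    rw [cybAdvance, dif_pos hi, if_pos (hb2 i hi hlt)]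
    exact cybAdvance_eq s hs t (i + 1) hlt
  · have hi : i = PySem.List.bisectLeft s t := Nat.le_antisymm h hge
    rw [cybAdvance]
    by_cases hil : i < s.length
    · rw [dif_pos hil, if_neg (by have := hb3 i hil hge; omega)]
      exact hi
    · rw [dif_neg hil]; exact hi
termination_by PySem.List.bisectLeft s t - i
decreasing_by omega

theorem bisectLeft_mono (s : List Int) (hs : s.Pairwise (· ≤ ·)) {t t' : Int} (h : t ≤ t') :
    PySem.List.bisectLeft s t ≤ PySem.List.bisectLeft s t' := by
  obtain ⟨hb1, hb2, hb3⟩ := PySem.List.bisectLeft_spec s t hs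
  obtain ⟨hc1, hc2, hc3⟩ := PySem.List.bisectLeft_spec s t' hs
  rcases Nat.lt_or_ge (PySem.List.bisectLeft s t') (PySem.List.bisectLeft s t) with hlt | hge
  · have hj : PySem.List.bisectLeft s t' < s.length := Nat.lt_of_lt_of_le hlt hb1
    have h1 := hb2 _ hj hlt
    have h2 := hc3 _ hj le_rfl
    omega
  · exact hge

theorem find_ge' (s : List Int) (t : Int) (i : Nat) (h1 : i ≤ s.length)
    (h2 : ∀ j (_ : j < s.length), j < i → s[j] < t)
    (h3 : ∀ j (hj : j < s.length), i ≤ j → t ≤ s[j]) :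
    s.find? (fun y => decide (y ≥ t)) = (if _ : i < s.length then some s[i] else none) := by
  conv_lhs => rw [← List.take_append_drop i s]
  rw [List.find?_append]
  have hnone : (s.take i).find? (fun y => decide (y ≥ t)) = none := by
    rw [List.find?_eq_none]
    intro x hx
    obtain ⟨j, hj, rfl⟩ := List.getElem_of_mem hx
    have hjl : j < s.length := by simp at hj; omega
    have hji : j < i := by simp at hj; omega
    have := h2 j hjl hji
    simp [List.getElem_take]
    omega
  rw [hnone, Option.none_or]
  by_cases hin : i < s.length
  · rw [List.drop_eq_getElem_cons hin, List.find?_cons_of_pos, dif_pos hin]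
    simpa using h3 i hin le_rfl
  · rw [List.drop_eq_nil_iff.mpr (by omega), dif_neg hin]
    rfl

theorem find_le' (s : List Int) (hs : s.Pairwise (· ≤ ·)) (t : Int) (i : Nat) (h1 : i ≤ s.length)
    (h2 : ∀ j (_ : j < s.length), j < i → s[j] < t)
    (h3 : ∀ j (hj : j < s.length), i ≤ j → t ≤ s[j]) :
    s.reverse.find? (fun y => decide (y ≤ t)) =
      (if i < s.length ∧ s[i]? = some t then some t
       else if 0 < i then s[i - 1]? else none) := by
  have hdropge : ∀ x ∈ s.drop i, t ≤ x := by
    intro x hx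
    obtain ⟨j, hj, rfl⟩ := List.getElem_of_mem hx
    rw [List.getElem_drop]
    exact h3 (i + j) (by simp at hj; omega) (by omega)
  have hdropmem : ∀ x ∈ s.drop i, x ≤ t → (i < s.length ∧ s[i]? = some t) := by
    intro x hx hxt
    have hxt' : x = t := le_antisymm hxt (hdropge x hx)
    obtain ⟨j, hj, rfl⟩ := List.getElem_of_mem hx
    have hjl : i + j < s.length := by simp at hj; omega
    have hil : i < s.length := by omega
    refine ⟨hil, ?_⟩
    have hle : s[i] ≤ s[i + j] := by
      rcases Nat.eq_or_lt_of_le (Nat.le_add_right i j) with he | hlt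
      · simp [← he]
      · exact List.pairwise_iff_getElem.mp hs i (i + j) hil hjl hlt
    rw [List.getElem_drop] at hxt'
    have : s[i] = t := le_antisymm (hxt' ▸ hle) (h3 i hil le_rfl)
    rw [List.getElem?_eq_getElem hil, this]
  conv_lhs => rw [← List.take_append_drop i s, List.reverse_append]
  rw [List.find?_append]
  by_cases hcase : i < s.length ∧ s[i]? = some t
  · have hfirst : (s.drop i).reverse.find? (fun y => decide (y ≤ t)) = some t := by
      have hmem : t ∈ (s.drop i).reverse := by
        rw [List.mem_reverse, List.drop_eq_getElem_cons hcase.1]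
        have := hcase.2
        rw [List.getElem?_eq_getElem hcase.1] at this
        simp at this
        simp [this]
      have hsome : ((s.drop i).reverse.find? (fun y => decide (y ≤ t))).isSome := by
        rw [List.find?_isSome]
        exact ⟨t, hmem, by simp⟩
      obtain ⟨x, hx⟩ := Option.isSome_iff_exists.mp hsome
      have hpx : x ≤ t := by simpa using List.find?_some hx
      have hxm : x ∈ s.drop i := List.mem_reverse.mp (List.mem_of_find?_eq_some hx)
      have : x = t := le_antisymm hpx (hdropge x hxm)
      rw [hx, this]
    rw [hfirst, if_pos hcase]
    rfl
  · have hfirst : (s.drop i).reverse.find? (fun y => decide (y ≤ t)) = none := by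
      rw [List.find?_eq_none]
      intro x hx hpx
      exact hcase (hdropmem x (List.mem_reverse.mp hx) (by simpa using hpx))
    rw [hfirst, Option.none_or, if_neg hcase]
    by_cases hz : 0 < i
    · have hil : i - 1 < s.length := by omega
      have htake : s.take i = s.take (i - 1) ++ [s[i - 1]] := by
        conv_lhs => rw [show i = (i - 1) + 1 by omega, List.take_add_one]
        rw [List.getElem?_eq_getElem hil]
        rfl
      rw [htake, List.reverse_append, List.reverse_singleton, List.singleton_append,
        List.find?_cons_of_pos]
      · rw [if_pos hz, List.getElem?_eq_getElem hil]
      · have := h2 (i - 1) hil (by omega)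
        simp
        omega
    · have : i = 0 := by omega
      rw [this]
      simp

theorem find_ge (s : List Int) (hs : s.Pairwise (· ≤ ·)) (t : Int) :
    s.find? (fun y => decide (y ≥ t)) = cybGe s t := by
  obtain ⟨hb1, hb2, hb3⟩ := PySem.List.bisectLeft_spec s t hs
  rw [find_ge' s t _ hb1 hb2 hb3]
  unfold cybGe
  by_cases h : PySem.List.bisectLeft s t < s.length
  · rw [dif_pos h, if_pos h, List.getElem?_eq_getElem h]
  · rw [dif_neg h, if_neg h]

theorem find_le (s : List Int) (hs : s.Pairwise (· ≤ ·)) (t : Int) :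
    s.reverse.find? (fun y => decide (y ≤ t)) = cybLe s t := by
  obtain ⟨hb1, hb2, hb3⟩ := PySem.List.bisectLeft_spec s t hs
  unfold cybLe
  exact find_le' s hs t _ hb1 hb2 hb3

theorem cyb_fold (s : List Int) (hs : s.Pairwise (· ≤ ·)) :
    ∀ (ks : List Int), ks.Pairwise (· ≤ ·) →
    ∀ (i0 : Nat) (d1 d2 : PySem.Dict Int (Option Int)),
    (∀ k ∈ ks, i0 ≤ PySem.List.bisectLeft s k) →
    (ks.foldl (cybStep s) (i0, d1, d2)).2 =
      ks.foldl (fun p year => (p.1.insert year (cybGe s year), p.2.insert year (cybLe s year))) (d1, d2) := by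
  intro ks
  induction ks with
  | nil => intro _ i0 d1 d2 _; rfl
  | cons k ks ih =>
    intro hp i0 d1 d2 hle
    rw [List.pairwise_cons] at hp
    have hadv : cybAdvance s k i0 = PySem.List.bisectLeft s k :=
      cybAdvance_eq s hs k i0 (hle k (List.mem_cons_self))
    have hstep : cybStep s (i0, d1, d2) k =
        (PySem.List.bisectLeft s k, d1.insert k (cybGe s k), d2.insert k (cybLe s k)) := by
      simp only [cybStep, hadv, cybGe, cybLe]
    rw [List.foldl_cons, List.foldl_cons, hstep]
    exact ih hp.2 _ _ _ (fun k' hk' => bisectLeft_mono s hs (hp.1 k' hk'))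

-- ===== VERDICT (by name: the statement is the Claim_ definition above) =====
theorem create_year_bounds_spec : Claim_equal_create_year_bounds := by
  intro years _
  unfold Spec_create_year_bounds create_year_bounds create_year_bounds_alt
  simp only []
  have hs : (PySem.List.sorted years (fun y => y) false).Pairwise (· ≤ ·) :=
    PySem.List.sorted_pairwise years (fun y => y)
  have hnd : ((PySem.List.pyRange 1900 2101 1).map (fun a => a)).Nodup := by
    rw [List.map_id']
    exact PySem.List.nodup_pyRange_one 1900 2101
  have hpw : (PySem.List.pyRange 1900 2101 1).Pairwise (· ≤ ·) :=
    (PySem.List.pairwise_lt_pyRange_one 1900 2101).imp le_of_lt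
  rw [cyb_fold _ hs _ hpw 0 _ _ (fun k _ => Nat.zero_le _)]
  rw [PySem.List.foldl_prod_mk
      (f := fun d year => PySem.Dict.insert d year ((PySem.List.sorted years (fun y => y) false).find? (fun y => decide (y ≥ year))))
      (g := fun d year => PySem.Dict.insert d year ((PySem.List.sorted years (fun y => y) false).reverse.find? (fun y => decide (y ≤ year))))]
  rw [PySem.List.foldl_prod_mk
      (f := fun d year => PySem.Dict.insert d year (cybGe (PySem.List.sorted years (fun y => y) false) year))
      (g := fun d year => PySem.Dict.insert d year (cybLe (PySem.List.sorted years (fun y => y) false) year))]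
  rw [PySem.Dict.items_foldl_insert_fresh _ (fun a => a) _ _ (fun a _ => PySem.Dict.contains_empty a) hnd,
      PySem.Dict.items_foldl_insert_fresh _ (fun a => a) _ _ (fun a _ => PySem.Dict.contains_empty a) hnd,
      PySem.Dict.items_foldl_insert_fresh _ (fun a => a) _ _ (fun a _ => PySem.Dict.contains_empty a) hnd,
      PySem.Dict.items_foldl_insert_fresh _ (fun a => a) _ _ (fun a _ => PySem.Dict.contains_empty a) hnd]
  simp only [find_ge _ hs, find_le _ hs]
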